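-- pv_equiv track=rewrite | github.com/DylanSalisbury/advent-of-code-2020 | python/06/util.py | group_to_set
-- ===== SOURCE A (Python) =====
-- def line_to_set(line):
--   return set(line)  # line is iterable
--
-- def group_to_set(group_text, intersection = False):
--   result = None
--   for l in group_text.split('\n'):
--     s = line_to_set(l)
--     if result is None:
--       result = s
--     elif intersection:
--       result = result.intersection(s)
--     else:
--       result = result.union(s)
--   return result
-- ===== SOURCE B (Python) =====
-- def group_to_set(group_text, intersection = False):
--   lines = group_text.split('\n')
--   counts = {}
--   for l in lines:
--     for c in set(l):
--       counts[c] = counts.get(c, 0) + 1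
--   if intersection:
--     n = len(lines)
--     return {c for c in counts if counts[c] == n}
--   return set(counts)
-- ===== Notes on version B (the rewrite author's own statement) =====
-- stated objective: alternative
-- what changed: B replaces A's None-seeded pairwise set union/intersection fold by building a per-character line-frequency dict once (dedup per line via set(l)) and then filtering characters by count == number of lines for the intersection, or taking all counted characters for the union.
import Mathlib
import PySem

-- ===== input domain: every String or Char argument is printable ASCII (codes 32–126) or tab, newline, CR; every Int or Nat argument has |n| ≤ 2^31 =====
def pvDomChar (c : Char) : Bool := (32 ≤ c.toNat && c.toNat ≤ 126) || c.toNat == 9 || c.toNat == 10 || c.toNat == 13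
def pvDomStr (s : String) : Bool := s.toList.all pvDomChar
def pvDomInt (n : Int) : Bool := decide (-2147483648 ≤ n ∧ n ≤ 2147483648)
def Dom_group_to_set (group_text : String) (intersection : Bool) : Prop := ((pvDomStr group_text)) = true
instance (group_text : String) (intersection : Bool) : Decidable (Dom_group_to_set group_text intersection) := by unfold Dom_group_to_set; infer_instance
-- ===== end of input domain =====

-- B replaces A's None-seeded pairwise set fold by a single per-character line-frequency
-- count (a dict built once), filtering by count == number-of-lines for the intersection
-- and taking all counted characters for the union (objective: alternative).

-- set(l) for a line l: the distinct one-character strings, in first-occurrence order.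
-- (Used by both ports: Source A's line_to_set and the inline set(l) of Source B.)
def pvLineToSet (l : String) : PySem.Set String :=
  PySem.Set.ofList (l.toList.map (fun c => String.ofList [c]))

-- ===== PORT A =====
-- Transliteration of Source A. group_text.split('\n') = PySem.Str.split? … "\n";
-- the separator "\n" is nonempty, so split? is never none and the list of lines is
-- nonempty, hence the accumulator is some _ at the end and both getD defaults are
-- unreachable (Python never returns None here).
def group_to_set (group_text : String) (intersection : Bool) : List String :=
  let result : Option (PySem.Set String) :=
    ((PySem.Str.split? group_text "\n").getD []).foldl
      (fun result l =>
        let s := pvLineToSet l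
        match result with
        | none => some s
        | some r =>
          if intersection then some (PySem.Set.inter r s) else some (PySem.Set.union r s))
      none
  result.getD []

-- ===== PORT B =====
-- Transliteration of Source B: build counts : dict (character → number of lines containing
-- it, dedup per line via set(l)), then filter by count == len(lines) (intersection) or
-- take set(counts) (union).
def group_to_set_alt (group_text : String) (intersection : Bool) : List String :=
  let lines := (PySem.Str.split? group_text "\n").getD []
  let counts : PySem.Dict String Int :=
    lines.foldl
      (fun counts l =>
        (pvLineToSet l).foldl (fun counts c => counts.insert c (counts.getD c 0 + 1)) counts)
      PySem.Dict.empty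
  if intersection then
    PySem.Set.ofList (counts.keys.filter (fun c => counts.getD c 0 == (lines.length : Int)))
  else
    PySem.Set.ofList counts.keys

-- ===== PRECONDITION & SPEC =====
def Spec_group_to_set (group_text : String) (intersection : Bool) (out : List String) : Prop := out = group_to_set_alt group_text intersection
instance (group_text : String) (intersection : Bool) (out : List String) : Decidable (Spec_group_to_set group_text intersection out) := by unfold Spec_group_to_set; infer_instance

-- ===== CLAIM (what is proved, stated in full; the proofs are below) =====
def Claim_equal_group_to_set : Prop := ∀ (group_text : String) (intersection : Bool), Dom_group_to_set group_text intersection → Spec_group_to_set group_text intersection (group_to_set group_text intersection)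

-- ===== LEMMAS AND PROOFS =====

-- keys of B's counting loop: each line's inner insert-fold extends the key set by S l.
theorem pv_keys_big (lines : List String) (d : PySem.Dict String Int) :
    (lines.foldl
      (fun counts l =>
        (pvLineToSet l).foldl (fun counts c => counts.insert c (counts.getD c 0 + 1)) counts)
      d).keys
    = lines.foldl (fun k l => PySem.Set.update k (pvLineToSet l)) d.keys := by
  induction lines generalizing d with
  | nil => rfl
  | cons l ls ih =>
    simp only [List.foldl_cons, ih,
      PySem.Dict.keys_foldl_insert (pvLineToSet l) (fun d x => d.getD x 0 + 1) d]

-- value of B's counter at c: how many lines contain c.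
theorem pv_count_big (lines : List String) (d : PySem.Dict String Int) (c : String) :
    (lines.foldl
      (fun counts l =>
        (pvLineToSet l).foldl (fun counts c => counts.insert c (counts.getD c 0 + 1)) counts)
      d).getD c 0
    = d.getD c 0 + ((lines.countP (fun l => (pvLineToSet l).contains c) : Nat) : Int) := by
  induction lines generalizing d with
  | nil => simp
  | cons l ls ih =>
    simp only [List.foldl_cons, ih, PySem.Dict.getD_foldl_insert_add_one (pvLineToSet l) d c,
      List.countP_cons]
    have hnd : (pvLineToSet l).Nodup := PySem.Set.nodup_ofList _
    by_cases hm : c ∈ pvLineToSet l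
    · have h1 : List.count c (pvLineToSet l) = 1 := List.count_eq_one_of_mem hnd hm
      simp [h1, hm]; omega
    · have h1 : List.count c (pvLineToSet l) = 0 := List.count_eq_zero_of_not_mem hm
      simp [h1, hm]

-- A's loop once the accumulator is some r.
theorem pv_some_fold (intersection : Bool) (ls : List String) (r : PySem.Set String) :
    (ls.foldl
      (fun result l =>
        let s := pvLineToSet l
        match result with
        | none => some s
        | some r =>
          if intersection then some (PySem.Set.inter r s) else some (PySem.Set.union r s))
      (some r))
    = some (ls.foldl
        (fun r l =>
          if intersection then PySem.Set.inter r (pvLineToSet l)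
          else PySem.Set.union r (pvLineToSet l)) r) := by
  cases intersection <;>
  · induction ls generalizing r with
    | nil => rfl
    | cons l ls ih => rw [List.foldl_cons]; exact ih _

-- the pairwise-intersection fold is one filter by membership in every later line.
theorem pv_inter_fold (ls : List String) (r : PySem.Set String) :
    ls.foldl (fun r l => PySem.Set.inter r (pvLineToSet l)) r
    = r.filter (fun c => ls.all (fun l => (pvLineToSet l).contains c)) := by
  induction ls generalizing r with
  | nil => simp
  | cons l ls ih =>
    rw [List.foldl_cons, ih]
    simp only [PySem.Set.inter, List.filter_filter, List.all_cons]
    simp [Bool.and_comm]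

-- folding updates never disturbs a filter whose predicate only holds inside the seed.
theorem pv_update_filter (p : String → Bool) (ls : List String) (k : PySem.Set String)
    (h : ∀ c, p c = true → c ∈ k) :
    (ls.foldl (fun k l => PySem.Set.update k (pvLineToSet l)) k).filter p = k.filter p := by
  induction ls generalizing k with
  | nil => rfl
  | cons l ls ih =>
    simp only [List.foldl_cons]
    rw [ih _ (fun c hc => (PySem.Set.mem_update _ _ _).2 (Or.inl (h c hc)))]
    rw [PySem.Set.update_eq_append_filter, List.filter_append]
    have : (List.filter p (List.filter (fun y => !k.contains y) (PySem.Set.ofList (pvLineToSet l)))) = [] := by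
      rw [List.filter_eq_nil_iff]
      intro c hc
      have hck := List.of_mem_filter hc
      simp only [Bool.not_eq_true', ← Bool.not_eq_true] at hck
      intro hp
      exact hck ((PySem.Set.contains_iff _ _).2 (h c hp))
    rw [this, List.append_nil]

-- nodup is preserved through the update fold.
theorem pv_nodup_fold (ls : List String) (k : PySem.Set String) (h : k.Nodup) :
    (ls.foldl (fun k l => PySem.Set.update k (pvLineToSet l)) k).Nodup := by
  induction ls generalizing k with
  | nil => exact h
  | cons l ls ih => exact ih _ (PySem.Set.nodup_update _ _ h)

-- B's counter (identical, by unfolding the let, to the dict Source B builds).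
def pvCounts (lines : List String) : PySem.Dict String Int :=
  lines.foldl
    (fun counts l =>
      (pvLineToSet l).foldl (fun counts c => counts.insert c (counts.getD c 0 + 1)) counts)
    PySem.Dict.empty

theorem pvCounts_keys (l : String) (ls : List String) :
    (pvCounts (l :: ls)).keys
    = ls.foldl (fun k l => PySem.Set.update k (pvLineToSet l)) (pvLineToSet l) := by
  unfold pvCounts
  rw [pv_keys_big, List.foldl_cons,
    show PySem.Set.update (PySem.Dict.empty (κ := String) (ν := Int)).keys (pvLineToSet l)
        = pvLineToSet l from by
      rw [show (PySem.Dict.empty (κ := String) (ν := Int)).keys = PySem.Set.empty from rfl,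
        PySem.Set.update_empty]
      exact PySem.Set.ofList_eq_self_of_nodup _ (PySem.Set.nodup_ofList _)]

theorem pvCounts_getD (lines : List String) (c : String) :
    (pvCounts lines).getD c 0
    = ((lines.countP (fun l => (pvLineToSet l).contains c) : Nat) : Int) := by
  unfold pvCounts
  rw [pv_count_big, PySem.Dict.getD_empty, zero_add]

-- the whole claim, stated over an arbitrary list of lines.
theorem pv_main (lines : List String) (intersection : Bool) :
    (lines.foldl
        (fun result l =>
          let s := pvLineToSet l
          match result with
          | none => some s
          | some r =>
            if intersection then some (PySem.Set.inter r s) else some (PySem.Set.union r s))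
        (none : Option (PySem.Set String))).getD []
    = (if intersection then
         PySem.Set.ofList ((pvCounts lines).keys.filter
           (fun c => (pvCounts lines).getD c 0 == (lines.length : Int)))
       else
         PySem.Set.ofList (pvCounts lines).keys) := by
  cases lines with
  | nil => cases intersection <;> rfl
  | cons l ls =>
    have hS : (pvLineToSet l).Nodup := PySem.Set.nodup_ofList _
    rw [List.foldl_cons]
    show (List.foldl _ (some (pvLineToSet l)) ls).getD [] = _
    rw [pv_some_fold]
    cases intersection with
    | false =>
      simp only [Option.getD_some, if_neg (Bool.false_ne_true), PySem.Set.union_eq_update,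
        pvCounts_keys]
      rw [PySem.Set.ofList_eq_self_of_nodup _ (pv_nodup_fold ls _ hS)]
    | true =>
      have hp : ∀ c, ((pvCounts (l :: ls)).getD c 0 == ((l :: ls).length : Int))
          = (l :: ls).all (fun l' => (pvLineToSet l').contains c) := by
        intro c
        rw [pvCounts_getD, Bool.eq_iff_iff]
        simp only [beq_iff_eq, Nat.cast_inj, List.countP_eq_length, List.all_eq_true]
      have hmem : ∀ c, ((pvCounts (l :: ls)).getD c 0 == ((l :: ls).length : Int)) = true
          → c ∈ pvLineToSet l := by
        intro c hc
        rw [hp c, List.all_cons, Bool.and_eq_true] at hc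
        exact (PySem.Set.contains_iff _ _).1 hc.1
      simp only [Option.getD_some, if_true]
      rw [pv_inter_fold, pvCounts_keys, pv_update_filter _ ls (pvLineToSet l) hmem]
      rw [List.filter_congr (fun c hm => (hp c).trans (by
        rw [List.all_cons, (PySem.Set.contains_iff (pvLineToSet l) c).2 hm, Bool.true_and]))]
      rw [PySem.Set.ofList_eq_self_of_nodup _ (hS.filter _)]
-- ===== VERDICT (by name: the statement is the Claim_ definition above) =====
theorem group_to_set_spec : Claim_equal_group_to_set := by
  intro g intersection _
  unfold Spec_group_to_set group_to_set group_to_set_alt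
  exact pv_main ((PySem.Str.split? g "\n").getD []) intersection
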